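-- pv_equiv track=rewrite | github.com/gali1998/ExtendedIntroToCSHomework | 3/bar.py | bar_cycle
-- ===== SOURCE A (Python) =====
-- def bar_cycle(n):
--
--     lst = [[] for i in range(n)]
--
--     for i in range(n):
--         for j in range(n):
--
--             if j == i + 1 or j == i - 1:
--                 lst[i].append(1)
--             else:
--                 lst[i].append(0)
--
--     lst[0][n-1] = 1
--     lst[n-1][0] = 1
--
--     return lst
-- ===== SOURCE B (Python) =====
-- def bar_cycle(n):
--     row = [0] * n
--     row[1 % n] = 1
--     row[(n - 1) % n] = 1
--     rows = []
--     for _ in range(n):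
--         rows.append(row)
--         row = row[-1:] + row[:-1]
--     return rows
-- ===== Notes on version B (the rewrite author's own statement) =====
-- stated objective: alternative
-- what changed: B treats the matrix as a circulant: it builds only the first row (1s at positions 1%n and (n-1)%n, which already encodes the wrap edges) and generates every further row by rotating the previous row one step right with slicing, instead of deciding each of the n^2 cells by a per-cell neighbour test and patching two corners afterwards.
import Mathlib
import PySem

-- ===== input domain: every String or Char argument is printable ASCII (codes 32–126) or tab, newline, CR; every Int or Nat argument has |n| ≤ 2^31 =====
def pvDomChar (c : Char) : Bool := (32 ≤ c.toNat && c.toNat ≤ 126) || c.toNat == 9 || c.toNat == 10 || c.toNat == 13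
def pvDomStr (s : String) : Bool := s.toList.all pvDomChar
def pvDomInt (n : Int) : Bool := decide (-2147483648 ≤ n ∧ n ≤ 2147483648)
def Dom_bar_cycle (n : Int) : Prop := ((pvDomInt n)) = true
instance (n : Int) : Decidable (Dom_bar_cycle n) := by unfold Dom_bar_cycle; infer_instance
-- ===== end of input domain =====

-- B builds the cycle matrix as a circulant: only the first row is computed, every later row is a rotation of it.

-- ===== PORT A =====
-- literal port: row list of empties, nested loops appending 1/0 per neighbour test, then the two wrap corners
def bar_cycle (n : Int) : List (List Int) :=
  let lst := (PySem.List.pyRange 0 n 1).map (fun _ => ([] : List Int))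
  let lst := (PySem.List.pyRange 0 n 1).foldl (fun lst i =>
    (PySem.List.pyRange 0 n 1).foldl (fun lst j =>
      if j == i + 1 || j == i - 1 then
        PySem.List.pySetD lst i (PySem.List.pyGetD lst i [] ++ [1])
      else
        PySem.List.pySetD lst i (PySem.List.pyGetD lst i [] ++ [0])) lst) lst
  let lst := PySem.List.pySetD lst 0 (PySem.List.pySetD (PySem.List.pyGetD lst 0 []) (n - 1) 1)
  let lst := PySem.List.pySetD lst (n - 1) (PySem.List.pySetD (PySem.List.pyGetD lst (n - 1) []) 0 1)
  lst

-- ===== PORT B =====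
-- literal port of Source B: first row [0]*n with 1s at 1%n and (n-1)%n, then n rows, each appended
-- before rotating the current row one step right (row = row[-1:] + row[:-1])
def bar_cycle_alt (n : Int) : List (List Int) :=
  let row := PySem.List.pyRepeat [(0 : Int)] n
  let row := PySem.List.pySetD row (PySem.Int.mod 1 n) 1
  let row := PySem.List.pySetD row (PySem.Int.mod (n - 1) n) 1
  let s := (PySem.List.pyRange 0 n 1).foldl
    (fun (s : List (List Int) × List Int) _ =>
      (s.1 ++ [s.2], PySem.List.slice s.2 (some (-1)) none ++ PySem.List.slice s.2 none (some (-1))))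
    (([] : List (List Int)), row)
  s.1

-- ===== PRECONDITION & SPEC =====
-- Pre_ excludes n ≤ 0, where A raises IndexError on lst[0] (B raises there too: ZeroDivisionError/IndexError).
def Pre_bar_cycle (n : Int) : Prop := 1 ≤ n
instance (n : Int) : Decidable (Pre_bar_cycle n) := by unfold Pre_bar_cycle; infer_instance
def pvWitness_bar_cycle : Int := 3

def Spec_bar_cycle (n : Int) (out : List (List Int)) : Prop := out = bar_cycle_alt n
instance (n : Int) (out : List (List Int)) : Decidable (Spec_bar_cycle n out) := by unfold Spec_bar_cycle; infer_instance

-- ===== CLAIM (what is proved, stated in full; the proofs are below) =====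
def Claim_equal_bar_cycle : Prop := ∀ (n : Int), Dom_bar_cycle n → Pre_bar_cycle n → Spec_bar_cycle n (bar_cycle n)

-- ===== LEMMAS AND PROOFS =====

-- setting index i < m in a map over range is a pointwise function update
theorem set_map_range {α : Type} (m i : Nat) (f : Nat → α) (v : α) :
    ((List.range m).map f).set i v = (List.range m).map (fun t => if t = i then v else f t) := by
  apply List.ext_getElem
  · simp
  · intro k h1 h2
    simp only [List.getElem_set, List.getElem_map, List.getElem_range]
    simp only [List.length_set, List.length_map, List.length_range] at h1
    by_cases hk : k = i
    · simp [hk]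
    · simp [hk]; intro h; exact absurd h.symm hk

-- the row produced by A's inner loop for index i
def rowOf (m i : Nat) : List Int :=
  (List.range m).map (fun (j : Nat) => if ((j : Int) == (i : Int) + 1 || (j : Int) == (i : Int) - 1) = true then (1 : Int) else 0)

-- A's inner loop appends one entry per j to row i
theorem innerA (m i : Nat) (hi : i < m) (c : Nat → Bool) :
    ∀ (js : List Nat) (f : Nat → List Int),
    js.foldl (fun (lst : List (List Int)) (j : Nat) =>
        if c j then
          PySem.List.pySetD lst (i : Int) (PySem.List.pyGetD lst (i : Int) [] ++ [(1 : Int)])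
        else
          PySem.List.pySetD lst (i : Int) (PySem.List.pyGetD lst (i : Int) [] ++ [(0 : Int)]))
      ((List.range m).map f)
    = (List.range m).map (fun t => if t = i then f i ++ js.map (fun j => if c j then (1 : Int) else 0) else f t) := by
  intro js
  induction js with
  | nil =>
    intro f
    simp only [List.foldl_nil, List.map_nil, List.append_nil]
    apply List.map_congr_left
    intro t _
    by_cases ht : t = i <;> simp [ht]
  | cons j js ih =>
    intro f
    have hget : PySem.List.pyGetD ((List.range m).map f) (i : Int) [] = f i := by
      simp [PySem.List.pyGetD_natCast, List.getD, hi]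
    have hstep : ∀ v : List Int,
        PySem.List.pySetD ((List.range m).map f) (i : Int) v
        = (List.range m).map (fun t => if t = i then v else f t) := by
      intro v
      rw [PySem.List.pySetD_natCast, set_map_range]
    simp only [List.foldl_cons]
    by_cases hc : c j
    · rw [if_pos hc, hget, hstep, ih]
      apply List.map_congr_left
      intro t _
      by_cases ht : t = i <;> simp [ht, hc]
    · rw [if_neg hc, hget, hstep, ih]
      apply List.map_congr_left
      intro t _
      by_cases ht : t = i <;> simp [ht, hc]

-- A's outer loop fills each listed (distinct) empty row with rowOf
theorem outerA (m : Nat) :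
    ∀ (ks : List Nat) (f : Nat → List Int), ks.Nodup → (∀ k ∈ ks, k < m) → (∀ k ∈ ks, f k = []) →
    ks.foldl (fun (lst : List (List Int)) (i : Nat) =>
        (List.range m).foldl (fun (lst : List (List Int)) (j : Nat) =>
          if ((j : Int) == (i : Int) + 1 || (j : Int) == (i : Int) - 1) then
            PySem.List.pySetD lst (i : Int) (PySem.List.pyGetD lst (i : Int) [] ++ [(1 : Int)])
          else
            PySem.List.pySetD lst (i : Int) (PySem.List.pyGetD lst (i : Int) [] ++ [(0 : Int)])) lst)
      ((List.range m).map f)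
    = (List.range m).map (fun t => if t ∈ ks then rowOf m t else f t) := by
  intro ks
  induction ks with
  | nil => intro f _ _ _; simp
  | cons k rest ih =>
    intro f hnd hlt hemp
    have hk : k < m := hlt k (by simp)
    rw [List.foldl_cons]
    rw [innerA m k hk (fun j => ((j : Int) == (k : Int) + 1 || (j : Int) == (k : Int) - 1)) (List.range m) f]
    rw [ih (fun t => if t = k then f k ++ (List.range m).map (fun (j : Nat) => if ((j:Int) == (k:Int)+1 || (j:Int) == (k:Int)-1) = true then (1:Int) else 0) else f t)
        hnd.of_cons (fun k' h => hlt k' (by simp [h]))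
        (fun k' h => by
          have hne : k' ≠ k := by rintro rfl; exact (List.nodup_cons.mp hnd).1 h
          simp [hne, hemp k' (by simp [h])])]
    apply List.map_congr_left
    intro t _
    by_cases htk : t = k
    · subst htk
      simp [hemp t (by simp), rowOf]
    · by_cases htr : t ∈ rest <;> simp [htk, htr]

-- setting entry (a,b) of a nested range-map matrix is a pointwise update
theorem pySet2_map (m a b : Nat) (ha : a < m) (g : Nat → Nat → Int) (v : Int) :
    PySem.List.pySetD ((List.range m).map (fun i => (List.range m).map (g i))) (a : Int)
      (PySem.List.pySetD (PySem.List.pyGetD ((List.range m).map (fun i => (List.range m).map (g i))) (a : Int) []) (b : Int) v)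
    = (List.range m).map (fun i => (List.range m).map (fun j => if i = a ∧ j = b then v else g i j)) := by
  have hget : PySem.List.pyGetD ((List.range m).map (fun i => (List.range m).map (g i))) (a : Int) []
      = (List.range m).map (g a) := by
    simp [PySem.List.pyGetD_natCast, List.getD, ha]
  rw [hget, PySem.List.pySetD_natCast, PySem.List.pySetD_natCast,
      set_map_range m b (g a) v, set_map_range m a _ _]
  apply List.map_congr_left
  intro i _
  by_cases hia : i = a
  · subst hia
    rw [if_pos rfl]
    apply List.map_congr_left
    intro j _
    by_cases hjb : j = b <;> simp [hjb]
  · rw [if_neg hia]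
    apply List.map_congr_left
    intro j _
    simp [hia]

-- A's full result as a nested range-map
def aval (m i j : Nat) : Int :=
  if i = m - 1 ∧ j = 0 then 1 else if i = 0 ∧ j = m - 1 then 1
  else if ((j : Int) == (i : Int) + 1 || (j : Int) == (i : Int) - 1) = true then 1 else 0

theorem bar_cycle_closed (m : Nat) (hm : 1 ≤ m) :
    bar_cycle (m : Int) = (List.range m).map (fun i => (List.range m).map (aval m i)) := by
  unfold bar_cycle
  have hr : PySem.List.pyRange 0 (m : Int) 1 = (List.range m).map (fun (k : Nat) => (k : Int)) := by
    rw [PySem.List.pyRange_one]; simp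
  rw [hr]
  simp only [List.foldl_map, List.map_map, Function.comp_def]
  rw [outerA m (List.range m) (fun _ => []) (List.nodup_range) (fun k h => List.mem_range.mp h)
        (fun _ _ => rfl)]
  have hmid : (List.range m).map (fun t => if t ∈ List.range m then rowOf m t else [])
      = (List.range m).map (fun (i : Nat) => (List.range m).map
          (fun (j : Nat) => if ((j : Int) == (i : Int) + 1 || (j : Int) == (i : Int) - 1) = true then (1 : Int) else 0)) := by
    apply List.map_congr_left
    intro t ht
    rw [if_pos ht]; rfl
  rw [hmid]
  have hc0 : (0 : Int) = ((0 : Nat) : Int) := by norm_num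
  have hc1 : (m : Int) - 1 = ((m - 1 : Nat) : Int) := by omega
  rw [hc0, hc1,
      pySet2_map m 0 (m - 1) (by omega) _ 1,
      pySet2_map m (m - 1) 0 (by omega) _ 1]
  apply List.map_congr_left
  intro i _
  apply List.map_congr_left
  intro j _
  unfold aval
  by_cases h1 : i = m - 1 ∧ j = 0 <;> by_cases h2 : i = 0 ∧ j = m - 1 <;> simp [h1, h2]

-- B's first row as a function of the column
def bbase (m j : Nat) : Int := if j = m - 1 then 1 else if j = 1 % m then 1 else 0

-- B's rotation index: row i, column j reads the base at (j - i) mod m, written without %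
def bshift (m i j : Nat) : Nat := if j < i then j + m - i else j - i

-- one right rotation of a range-map row
theorem rot_map (m : Nat) (hm : 1 ≤ m) (f : Nat → Int) :
    PySem.List.slice ((List.range m).map f) (some (-1)) none
      ++ PySem.List.slice ((List.range m).map f) none (some (-1))
    = (List.range m).map (fun j => if j = 0 then f (m - 1) else f (j - 1)) := by
  rw [PySem.List.slice_from_neg_one, PySem.List.slice_to_neg_one]
  have hsplit : (List.range m).map f = (List.range (m - 1)).map f ++ [f (m - 1)] := by
    conv_lhs => rw [show m = (m - 1) + 1 by omega, List.range_succ]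
    simp
  have hlen : ((List.range (m - 1)).map f).length = m - 1 := by simp
  have hrm : List.range m = 0 :: (List.range (m - 1)).map Nat.succ := by
    conv_lhs => rw [show m = (m - 1) + 1 by omega, List.range_succ_eq_map]
  rw [hsplit, List.length_append, List.length_map, List.length_range]
  have h2 : m - 1 + [f (m - 1)].length - 1 = m - 1 := by simp
  rw [h2, List.drop_left' hlen, List.dropLast_concat, hrm]
  simp only [List.map_cons, List.map_map, Function.comp_def, Nat.succ_eq_add_one,
    List.singleton_append]
  simp

-- the fold invariant: starting from rotation state i, each step appends the current row and rotates
theorem foldB (m : Nat) (hm : 1 ≤ m) (base : Nat → Int) :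
    ∀ (l : List Int) (i : Nat) (acc : List (List Int)), i + l.length ≤ m →
    (l.foldl (fun (s : List (List Int) × List Int) _ =>
        (s.1 ++ [s.2], PySem.List.slice s.2 (some (-1)) none ++ PySem.List.slice s.2 none (some (-1))))
      (acc, (List.range m).map (fun j => base (bshift m i j)))).1
    = acc ++ (List.range l.length).map (fun t => (List.range m).map (fun j => base (bshift m (i + t) j))) := by
  intro l
  induction l with
  | nil => intro i acc _; simp
  | cons x xs ih =>
    intro i acc hle
    simp only [List.length_cons] at hle
    simp only [List.foldl_cons]
    rw [rot_map m hm]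
    have hrow : (List.range m).map (fun j => if j = 0 then base (bshift m i (m - 1)) else base (bshift m i (j - 1)))
        = (List.range m).map (fun j => base (bshift m (i + 1) j)) := by
      apply List.map_congr_left
      intro j hj
      have hj' := List.mem_range.mp hj
      by_cases hj0 : j = 0
      · subst hj0
        rw [if_pos rfl]
        have harg : bshift m i (m - 1) = bshift m (i + 1) 0 := by
          unfold bshift; split_ifs <;> omega
        rw [harg]
      · rw [if_neg hj0]
        have harg : bshift m i (j - 1) = bshift m (i + 1) j := by
          unfold bshift; split_ifs <;> omega
        rw [harg]
    rw [hrow, ih (i + 1) (acc ++ [(List.range m).map (fun j => base (bshift m i j))]) (by omega),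
        List.append_assoc]
    congr 1
    simp only [List.length_cons, List.range_succ_eq_map, List.map_cons, List.map_map,
      Function.comp_def, Nat.succ_eq_add_one, Nat.add_zero, List.singleton_append]
    congr 1
    apply List.map_congr_left
    intro t _
    rw [show i + 1 + t = i + (t + 1) from by omega]

-- B's full result as a nested range-map
theorem alt_closed (m : Nat) (hm : 1 ≤ m) :
    bar_cycle_alt (m : Int) = (List.range m).map (fun i => (List.range m).map (fun j => bbase m (bshift m i j))) := by
  unfold bar_cycle_alt
  have hrep : PySem.List.pyRepeat [(0 : Int)] (m : Int) = (List.range m).map (fun _ => (0 : Int)) := by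
    rw [PySem.List.pyRepeat_singleton]
    simp [List.map_const']
  have hmod1 : PySem.Int.mod 1 (m : Int) = ((1 % m : Nat) : Int) := by
    exact_mod_cast PySem.Int.mod_natCast 1 m
  have hmodm : PySem.Int.mod ((m : Int) - 1) (m : Int) = ((m - 1 : Nat) : Int) := by
    have h : (m : Int) - 1 = ((m - 1 : Nat) : Int) := by omega
    rw [h]
    rw [PySem.Int.mod_natCast]
    congr 1
    exact Nat.mod_eq_of_lt (by omega)
  simp only [hrep, hmod1, hmodm, PySem.List.pySetD_natCast, set_map_range]
  have hrow0 : (List.range m).map (fun t => if t = m - 1 then (1 : Int) else if t = 1 % m then 1 else 0)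
      = (List.range m).map (fun j => bbase m (bshift m 0 j)) := by
    apply List.map_congr_left
    intro t _
    simp [bbase, bshift]
  rw [hrow0]
  have hlen : (PySem.List.pyRange 0 (m : Int) 1).length = m := by
    rw [PySem.List.length_pyRange_one]; omega
  have := foldB m hm (bbase m) (PySem.List.pyRange 0 (m : Int) 1) 0 [] (by rw [hlen]; omega)
  simp only [Nat.zero_add, List.nil_append] at this
  rw [this, hlen]

-- ===== VERDICT (by name: the statement is the Claim_ definition above) =====
theorem bar_cycle_spec : Claim_equal_bar_cycle := by
  intro n _ hn
  unfold Pre_bar_cycle at hn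
  unfold Spec_bar_cycle
  obtain ⟨m, rfl⟩ : ∃ m : Nat, n = (m : Int) := ⟨n.toNat, by omega⟩
  have hm : 1 ≤ m := by exact_mod_cast hn
  rw [bar_cycle_closed m hm, alt_closed m hm]
  apply List.map_congr_left
  intro i hi
  apply List.map_congr_left
  intro j hj
  have hi' := List.mem_range.mp hi
  have hj' := List.mem_range.mp hj
  have h1m : 1 % m = if m = 1 then 0 else 1 := by
    by_cases h : m = 1
    · simp [h]
    · rw [Nat.mod_eq_of_lt (by omega)]; simp [h]
  unfold aval bbase bshift
  simp only [Bool.or_eq_true, beq_iff_eq, h1m]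
  split_ifs <;> omega
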